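-- pv_equiv track=rewrite | github.com/Player223124/BlockCode | algorithm.py | multi_S
-- ===== SOURCE A (Python) =====
-- from copy import deepcopy
--
-- def multi_S(mat, vec):
--     indexes = [i for i in range(len(vec)) if vec[i] == 0]
--     k = len(mat[0])
--     count = 0
--     mat = deepcopy(mat)
--     for numb in indexes:
--         mat.pop(numb-count)
--         count += 1
--
--     s = [0 for j in range(k)]
--     if mat:
--         for numb in range(len(mat)):
--             row = mat[numb]
--             string = []
--             for ind in range(len(row)):
--                 if s[ind] == row[ind]:
--                     string.append(0)
--                 else:
--                     string.append(1)
--             s = string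
--         return(s)
--     else:
--         return(s)
-- ===== SOURCE B (Python) =====
-- def multi_S(mat, vec):
--     zeros = {i for i, v in enumerate(vec) if v == 0}
--     rows = [row for i, row in enumerate(mat) if i not in zeros]
--     k = len(mat[0])
--     if not rows:
--         return [0] * k
--     out = []
--     for col in zip(*rows):
--         s = 0
--         for v in col:
--             s = int(s != v)
--         out.append(s)
--     return out
-- ===== Notes on version B (the rewrite author's own statement) =====
-- stated objective: simpler
-- what changed: B replaces A's deepcopy-and-pop row removal (with a shifting count) by a direct index filter, and replaces A's row-by-row accumulator rebuild by a column-major fold over zip(*rows).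
import Mathlib
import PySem

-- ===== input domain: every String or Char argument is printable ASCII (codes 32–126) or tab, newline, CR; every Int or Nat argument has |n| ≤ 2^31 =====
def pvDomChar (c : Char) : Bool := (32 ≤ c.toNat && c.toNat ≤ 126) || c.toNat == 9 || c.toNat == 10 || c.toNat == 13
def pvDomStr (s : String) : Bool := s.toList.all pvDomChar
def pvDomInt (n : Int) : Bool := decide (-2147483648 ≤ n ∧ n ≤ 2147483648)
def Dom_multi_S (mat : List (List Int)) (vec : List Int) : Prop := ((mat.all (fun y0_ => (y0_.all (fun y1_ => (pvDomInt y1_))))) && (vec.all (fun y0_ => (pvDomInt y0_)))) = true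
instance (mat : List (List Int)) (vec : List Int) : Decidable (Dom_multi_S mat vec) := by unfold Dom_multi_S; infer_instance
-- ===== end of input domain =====

-- B replaces A's deepcopy-and-pop row removal by an index filter and folds the kept
-- rows column by column (zip) instead of row by row (objective: simpler; return value only —
-- A mutates only its own deepcopy, so there is no observable side effect to mirror).

-- ===== PORT A =====
-- the `for numb in indexes: mat.pop(numb-count); count += 1` loop
def pvPopLoop : List Int → Int → List (List Int) → List (List Int)
  | [], _, m => m
  | i :: is, c, m => pvPopLoop is (c + 1) (((PySem.List.pop? m (i - c)).map Prod.snd).getD m)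

-- inner loop: string = [0 if s[ind]==row[ind] else 1 for ind in range(len(row))];
-- `List.getD` with a Nat index is exact here: inside Pre_ every ind is in range of both s and row
def pvRowStep (s row : List Int) : List Int :=
  (List.range row.length).map (fun ind => if s.getD ind 0 = row.getD ind 0 then (0 : Int) else 1)

def multi_S (mat : List (List Int)) (vec : List Int) : List Int :=
  let indexes : List Int :=
    (PySem.List.pyRange 0 (vec.length : Int) 1).filter (fun i => PySem.List.pyGetD vec i 0 = 0)
  -- k = len(mat[0]); IndexError on empty mat is excluded by Pre_
  let k : Nat := ((PySem.List.pyGet? mat 0).getD []).length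
  let mat2 := pvPopLoop indexes 0 mat
  let s : List Int := (List.range k).map (fun _ => (0 : Int))
  if mat2 = [] then s else mat2.foldl pvRowStep s

-- ===== PORT B =====
def multi_S_alt (mat : List (List Int)) (vec : List Int) : List Int :=
  let zeros : PySem.Set Int :=
    PySem.Set.ofList ((PySem.List.enumerate vec).filterMap (fun p => if p.2 = 0 then some p.1 else none))
  let rows : List (List Int) :=
    (PySem.List.enumerate mat).filterMap (fun p => if PySem.Set.contains zeros p.1 then none else some p.2)
  let k : Nat := ((PySem.List.pyGet? mat 0).getD []).length
  match rows with
  | [] => List.replicate k 0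
  | r :: rs =>
    -- zip(*rows) truncates to the shortest row, so every index below is in range (exact)
    let width : Nat := rs.foldl (fun w row => min w row.length) r.length
    (List.range width).map (fun j =>
      let col : List Int := (r :: rs).map (fun row => row.getD j 0)
      col.foldl (fun s v => if s ≠ v then (1 : Int) else 0) 0)

-- ===== PRECONDITION & SPEC =====
-- the rows of `mat` that survive A's pop loop (helper for Pre_; used by neither port)
def pvKept : List (List Int) → List Int → List (List Int)
  | m, [] => m
  | [], _ :: _ => []
  | r :: m, v :: vs => if v = 0 then pvKept m vs else r :: pvKept m vs

-- Pre_ excludes exactly the inputs on which A raises: empty mat (len(mat[0]) IndexError),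
-- a zero of vec at an index ≥ len(mat) (pop IndexError), and kept-row lengths that ever
-- increase along (len(mat[0]) :: kept lengths) (s[ind] IndexError in the fold).
def Pre_multi_S (mat : List (List Int)) (vec : List Int) : Prop :=
  mat ≠ [] ∧
  (∀ i ∈ List.range vec.length, vec.getD i 0 = 0 → i < mat.length) ∧
  List.IsChain (fun a b => b ≤ a) ((mat.headD []).length :: (pvKept mat vec).map List.length)
instance (mat : List (List Int)) (vec : List Int) : Decidable (Pre_multi_S mat vec) := by
  unfold Pre_multi_S; infer_instance

def pvWitness_multi_S : List (List Int) × List Int := ([[1, 2], [3, 4]], [1, 0])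

def Spec_multi_S (mat : List (List Int)) (vec : List Int) (out : List Int) : Prop := out = multi_S_alt mat vec
instance (mat : List (List Int)) (vec : List Int) (out : List Int) : Decidable (Spec_multi_S mat vec out) := by unfold Spec_multi_S; infer_instance

-- ===== CLAIM (what is proved, stated in full; the proofs are below) =====
def Claim_equal_multi_S : Prop := ∀ (mat : List (List Int)) (vec : List Int), Dom_multi_S mat vec → Pre_multi_S mat vec → Spec_multi_S mat vec (multi_S mat vec)

-- ===== LEMMAS AND PROOFS =====

-- zero positions of vec, as a recursively defined Nat list
def pvZ : List Int → List Nat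
  | [] => []
  | v :: vs => if v = 0 then 0 :: (pvZ vs).map (· + 1) else (pvZ vs).map (· + 1)

theorem pvZ_mem : ∀ (vs : List Int) (n : Nat), n ∈ pvZ vs ↔ n < vs.length ∧ vs.getD n 0 = 0 := by
  intro vs
  induction vs with
  | nil => intro n; simp [pvZ]
  | cons v vs ih =>
    intro n
    by_cases hv : v = 0 <;> cases n <;>
      simp [pvZ, hv, ih]

theorem pvZ_pairwise : ∀ (vs : List Int), (pvZ vs).Pairwise (· < ·) := by
  intro vs
  induction vs with
  | nil => simp [pvZ]
  | cons v vs ih =>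
    by_cases hv : v = 0 <;>
      simp [pvZ, hv, List.pairwise_map] <;>
      exact ih

theorem pvZ_eq_filter : ∀ (vs : List Int),
    (List.range vs.length).filter (fun n => decide (vs.getD n 0 = 0)) = pvZ vs := by
  intro vs
  induction vs with
  | nil => simp [pvZ]
  | cons v vs ih =>
    by_cases hv : v = 0 <;>
      simp [pvZ, hv, List.range_succ_eq_map, List.filter_map, ← ih, Function.comp_def] <;> rfl

-- A's index list equals pvZ, cast to Int
theorem pvIndexes_eq (vec : List Int) :
    (PySem.List.pyRange 0 (vec.length : Int) 1).filter (fun i => PySem.List.pyGetD vec i 0 = 0)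
      = (pvZ vec).map (fun n : Nat => (n : Int)) := by
  rw [PySem.List.pyRange_zero_natCast, List.filter_map, ← pvZ_eq_filter]
  simp [Function.comp_def]

-- pop successes/failures on a cons at a positive index mirror the tail
theorem pvPop_cons (r : List Int) (m : List (List Int)) (j : Nat) :
    ((PySem.List.pop? (r :: m) ((j : Int) + 1)).map Prod.snd).getD (r :: m)
      = r :: ((PySem.List.pop? m (j : Int)).map Prod.snd).getD m := by
  by_cases h : j < m.length
  · have e1 : ((j : Int) + 1) = ((j + 1 : Nat) : Int) := by push_cast; ring
    rw [e1, PySem.List.pop?_natCast (r :: m) (j + 1) (by simp [h]),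
      PySem.List.pop?_natCast m j h]
    simp
  · have h1 : PySem.List.pop? m (j : Int) = none := by
      simp [PySem.List.pop?, PySem.List.pyIdx?]
      omega
    have h2 : PySem.List.pop? (r :: m) ((j : Int) + 1) = none := by
      simp [PySem.List.pop?, PySem.List.pyIdx?]
      intro a
      split_ifs <;> simp_all
      omega
    simp [h1, h2]

-- shifting every index by one past a preserved head row
theorem pvPopLoop_shift : ∀ (js : List Nat) (d : Nat) (r : List Int) (m : List (List Int)),
    js.Pairwise (· < ·) →
    pvPopLoop (js.map (fun n => ((n + 1 + d : Nat) : Int))) (d : Int) (r :: m)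
      = r :: pvPopLoop (js.map (fun n => ((n + d : Nat) : Int))) (d : Int) m := by
  intro js
  induction hL : js.length using Nat.strong_induction_on generalizing js with
  | _ L IH =>
    cases js with
    | nil => intro d r m _; simp [pvPopLoop]
    | cons j js' =>
      intro d r m hpw
      have hpos : ∀ n ∈ js', 1 ≤ n := fun n hn => by
        have := (List.pairwise_cons.mp hpw).1 n hn; omega
      have hd1 : ((j + 1 + d : Nat) : Int) - (d : Int) = ((j : Int) + 1) := by push_cast; ring
      have hd2 : ((j + d : Nat) : Int) - (d : Int) = ((j : Int)) := by push_cast; ring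
      simp only [List.map_cons, pvPopLoop, hd1, hd2, pvPop_cons]
      have e1 : js'.map (fun n => ((n + 1 + d : Nat) : Int))
          = (js'.map (· - 1)).map (fun n => ((n + 1 + (d + 1) : Nat) : Int)) := by
        rw [List.map_map]
        exact List.map_congr_left fun n hn => by have := hpos n hn; simp; omega
      have e2 : js'.map (fun n => ((n + d : Nat) : Int))
          = (js'.map (· - 1)).map (fun n => ((n + (d + 1) : Nat) : Int)) := by
        rw [List.map_map]
        exact List.map_congr_left fun n hn => by have := hpos n hn; simp; omega
      have epw : (js'.map (· - 1)).Pairwise (· < ·) := by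
        rw [List.pairwise_map]
        exact ((List.pairwise_cons.mp hpw).2).imp_of_mem
          (fun ha hb hlt => by have := hpos _ ha; have := hpos _ hb; omega)
      have ecast : (d : Int) + 1 = ((d + 1 : Nat) : Int) := by push_cast; ring
      rw [e1, e2, ecast, IH (js'.map (· - 1)).length (by simp [← hL]) _ rfl (d + 1) r _ epw]

theorem pvPopLoop_eq_kept : ∀ (vs : List Int) (d : Nat) (m : List (List Int)),
    (∀ n ∈ pvZ vs, n < m.length) →
    pvPopLoop ((pvZ vs).map (fun n => ((n + d : Nat) : Int))) (d : Int) m = pvKept m vs := by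
  intro vs
  induction vs with
  | nil => intro d m _; simp [pvZ, pvPopLoop, pvKept]
  | cons v vs ih =>
    intro d m hb
    cases m with
    | nil =>
      have hz : pvZ (v :: vs) = [] := by
        cases h : pvZ (v :: vs) with
        | nil => rfl
        | cons a l => exact absurd (hb a (h ▸ List.mem_cons_self)) (by simp)
      simp [hz, pvPopLoop, pvKept]
    | cons r mm =>
      by_cases hv : v = 0
      · have hz : pvZ (v :: vs) = 0 :: (pvZ vs).map (· + 1) := by simp [pvZ, hv]
        have hd0 : ((0 + d : Nat) : Int) - (d : Int) = 0 := by push_cast; ring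
        rw [hz]
        simp only [List.map_cons, pvPopLoop, hd0, PySem.List.pop?_zero_cons]
        have emap : ((pvZ vs).map (· + 1)).map (fun n => ((n + d : Nat) : Int))
            = (pvZ vs).map (fun n => ((n + (d + 1) : Nat) : Int)) := by
          rw [List.map_map]; exact List.map_congr_left fun n _ => by simp; omega
        have ecast : (d : Int) + 1 = ((d + 1 : Nat) : Int) := by push_cast; ring
        rw [show ((Option.map Prod.snd (some (r, mm))).getD (r :: mm)) = mm by rfl,
          emap, ecast, ih (d + 1) mm ?_]
        · simp [pvKept, hv]
        · intro n hn
          have := hb (n + 1) (by rw [hz]; exact List.mem_cons_of_mem _ (List.mem_map_of_mem hn))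
          simpa using this
      · have hz : pvZ (v :: vs) = (pvZ vs).map (· + 1) := by simp [pvZ, hv]
        rw [hz, List.map_map,
          show ((fun n => ((n + d : Nat) : Int)) ∘ (· + 1 : Nat → Nat)) = (fun n => ((n + 1 + d : Nat) : Int)) by
            funext n; simp,
          pvPopLoop_shift (pvZ vs) d r mm (pvZ_pairwise vs),
          ih d mm ?_]
        · simp [pvKept, hv]
        · intro n hn
          have := hb (n + 1) (by rw [hz]; exact List.mem_map_of_mem hn)
          simpa using this

theorem pvFilter_none (q : Int → Bool) : ∀ (m : List (List Int)) (s : Int),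
    (∀ n : Nat, q (s + n) = false) →
    (PySem.List.enumerate m s).filterMap (fun p => if q p.1 then none else some p.2) = m := by
  intro m
  induction m with
  | nil => intro s _; simp [PySem.List.enumerate_nil]
  | cons r mm ih =>
    intro s hq
    rw [PySem.List.enumerate_cons]
    have h0 : q s = false := by have := hq 0; simpa using this
    simp only [List.filterMap_cons, h0]
    rw [ih (s + 1) (fun n => by have := hq (n + 1); push_cast at this ⊢; rw [← this]; ring_nf)]
    simp

theorem pvFilter_kept (q : Int → Bool) : ∀ (m : List (List Int)) (vs : List Int) (s : Int),
    (∀ n : Nat, q (s + n) = (decide (n < vs.length) && decide (vs.getD n 0 = 0))) →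
    (PySem.List.enumerate m s).filterMap (fun p => if q p.1 then none else some p.2) = pvKept m vs := by
  intro m
  induction m with
  | nil => intro vs s _; cases vs <;> simp [PySem.List.enumerate_nil, pvKept]
  | cons r mm ih =>
    intro vs s hq
    cases vs with
    | nil =>
      rw [show pvKept (r :: mm) [] = r :: mm from rfl]
      exact pvFilter_none q (r :: mm) s (fun n => by have := hq n; simpa using this)
    | cons v vs' =>
      rw [PySem.List.enumerate_cons]
      have h0 : q s = decide (v = 0) := by have := hq 0; simpa using this
      have hrec : ∀ n : Nat, q ((s + 1) + n) = (decide (n < vs'.length) && decide (vs'.getD n 0 = 0)) := by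
        intro n
        have := hq (n + 1)
        rw [show s + (↑(n + 1) : Int) = (s + 1) + n by push_cast; ring] at this
        simpa using this
      by_cases hv : v = 0
      · simp only [List.filterMap_cons, h0, hv, decide_true, ih vs' (s + 1) hrec]
        simp [pvKept]
      · simp only [List.filterMap_cons, h0, ih vs' (s + 1) hrec]
        simp [pvKept, hv]

-- B's filtered rows are the same kept rows
theorem pvRows_eq (mat : List (List Int)) (vec : List Int) :
    (PySem.List.enumerate mat).filterMap (fun p =>
        if PySem.Set.contains (PySem.Set.ofList ((PySem.List.enumerate vec).filterMap
            (fun q => if q.2 = 0 then some q.1 else none))) p.1 then none else some p.2)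
      = pvKept mat vec := by
  apply pvFilter_kept _ mat vec 0
  intro n
  have hmem : ((0 : Int) + n) ∈ (PySem.Set.ofList ((PySem.List.enumerate vec).filterMap
      (fun q => if q.2 = 0 then some q.1 else none))) ↔ (n < vec.length ∧ vec.getD n 0 = 0) := by
    rw [PySem.Set.mem_ofList]
    simp only [List.mem_filterMap]
    constructor
    · rintro ⟨p, hp, hif⟩
      obtain ⟨k, hk, rfl⟩ := (PySem.List.mem_enumerate_iff _ _ _).mp hp
      by_cases h2 : vec[k] = 0
      · simp [h2] at hif
        have : n = k := by omega
        subst this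
        exact ⟨hk, by simp [List.getD_eq_getElem?_getD, List.getElem?_eq_getElem hk, h2]⟩
      · simp [h2] at hif
    · rintro ⟨hn, h0⟩
      refine ⟨(0 + n, vec[n]), (PySem.List.mem_enumerate_iff _ _ _).mpr ⟨n, hn, rfl⟩, ?_⟩
      have : vec[n] = 0 := by
        rw [List.getD_eq_getElem?_getD, List.getElem?_eq_getElem hn] at h0
        simpa using h0
      simp [this]
  rw [Bool.eq_iff_iff, PySem.Set.contains_iff, hmem]
  simp

-- A's row-major fold, started from an indexed initial accumulator, computed column-wise
theorem pvFold_cols : ∀ (rows : List (List Int)) (L : Nat) (f : Nat → Int),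
    List.IsChain (fun a b => b ≤ a) (L :: rows.map List.length) →
    rows.foldl pvRowStep ((List.range L).map f)
      = (List.range ((rows.map List.length).getLastD L)).map (fun j =>
          rows.foldl (fun s row => if s ≠ row.getD j 0 then (1 : Int) else 0) (f j)) := by
  intro rows
  induction rows with
  | nil => intro L f _; simp
  | cons r rs ih =>
    intro L f hch
    have hrL : r.length ≤ L := by
      have := hch
      rw [List.isChain_cons] at this
      simpa using this.1
    have hch' : List.IsChain (fun a b => b ≤ a) (r.length :: rs.map List.length) := by
      rw [List.map_cons, List.isChain_cons] at hch
      exact hch.2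
    have hstep : pvRowStep ((List.range L).map f) r
        = (List.range r.length).map (fun j => if f j = r.getD j 0 then (0 : Int) else 1) := by
      unfold pvRowStep
      refine List.map_congr_left fun j hj => ?_
      have hjL : j < L := lt_of_lt_of_le (List.mem_range.mp hj) hrL
      rw [List.getD_eq_getElem?_getD, List.getElem?_map, List.getElem?_range hjL]
      simp
    rw [List.foldl_cons, hstep,
      ih r.length (fun j => if f j = r.getD j 0 then (0 : Int) else 1) hch']
    rw [List.map_cons, List.getLastD_cons]
    refine List.map_congr_left fun j hj => ?_
    rw [List.foldl_cons]
    congr 1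
    by_cases h : f j = r.getD j 0 <;> simp [h]

theorem pvWidth_eq : ∀ (rs : List (List Int)) (r : List Int),
    List.IsChain (fun a b => b ≤ a) (r.length :: rs.map List.length) →
    rs.foldl (fun w row => min w row.length) r.length = (rs.map List.length).getLastD r.length := by
  intro rs
  induction rs with
  | nil => intro r _; simp
  | cons q rs ih =>
    intro r hch
    rw [List.map_cons, List.isChain_cons] at hch
    have h1 : q.length ≤ r.length := by simpa using hch.1
    rw [List.foldl_cons, min_eq_right h1, List.map_cons, List.getLastD_cons]
    exact ih q hch.2

-- ===== VERDICT (by name: the statement is the Claim_ definition above) =====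
theorem multi_S_spec : Claim_equal_multi_S := by
  intro mat vec _ hpre
  obtain ⟨hne, hb, hch⟩ := hpre
  obtain ⟨h, t, rfl⟩ : ∃ h t, mat = h :: t := by
    cases mat with
    | nil => exact absurd rfl hne
    | cons h t => exact ⟨h, t, rfl⟩
  unfold Spec_multi_S multi_S multi_S_alt
  simp only []
  rw [pvIndexes_eq, pvRows_eq]
  have hbz : ∀ n ∈ pvZ vec, n < (h :: t).length := by
    intro n hn
    obtain ⟨hlt, h0⟩ := (pvZ_mem vec n).mp hn
    exact hb n (List.mem_range.mpr hlt) h0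
  have hpop : pvPopLoop ((pvZ vec).map (fun n : Nat => (n : Int))) 0 (h :: t) = pvKept (h :: t) vec := by
    have := pvPopLoop_eq_kept vec 0 (h :: t) hbz
    simpa using this
  rw [hpop]
  rw [PySem.List.pyGet?_zero_cons]
  simp only [Option.getD_some]
  have hhead : (List.headD (h :: t) []) = h := rfl
  rw [hhead] at hch
  cases hk : pvKept (h :: t) vec with
  | nil =>
    simp
  | cons r rs =>
    rw [hk] at hch
    have hchr : List.IsChain (fun a b : Nat => b ≤ a) (r.length :: rs.map List.length) := by
      rw [List.map_cons, List.isChain_cons] at hch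
      exact hch.2
    rw [if_neg (by simp)]
    show List.foldl pvRowStep ((List.range h.length).map (fun _ => (0 : Int))) (r :: rs) = _
    rw [pvFold_cols (r :: rs) h.length (fun _ => 0) hch, List.map_cons, List.getLastD_cons,
      ← pvWidth_eq rs r hchr]
    show _ = (List.range (rs.foldl (fun w row => min w row.length) r.length)).map
        (fun j => ((r :: rs).map (fun row => row.getD j 0)).foldl
          (fun s v => if s ≠ v then (1 : Int) else 0) 0)
    refine List.map_congr_left fun j hj => ?_
    rw [List.foldl_map]
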